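-- pv_equiv track=rewrite | github.com/maykon1313/Faculdade | 1º Semester/Algoritmo e programação 1/Exercícios/Provas/P3/Maykon Kazuhiro Falcão Tamanaha/P3.py | opinioes_aluno_especifico
-- ===== SOURCE A (Python) =====
-- def opinioes_aluno_especifico(nome, opinioes):
--     opinioes_aluno = []
--     i = 0
--     while i < len(opinioes):
--         if nome == opinioes[i].split(",")[0]:
--             opinioes_aluno.append(opinioes[i])
--         i += 1
--     opinioes_aluno = ordenar_bubble(opinioes_aluno)
--     return opinioes_aluno
--
-- def ordenar_bubble(vetor):
--     i = 0
--     while i < len(vetor) -1: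
--         j = 0
--         while j < len(vetor) -1:
--             if len(vetor[j]) < len(vetor[j +1]):
--                 vetor[j], vetor[j +1] = vetor[j +1], vetor[j]
--             j += 1
--         i += 1
--     return vetor
-- ===== SOURCE B (Python) =====
-- def opinioes_aluno_especifico(nome, opinioes):
--     sel = [op for op in opinioes if op.split(",")[0] == nome]
--     lens = sorted({len(op) for op in sel}, reverse=True)
--     return [op for k in lens for op in sel if len(op) == k]
-- ===== Notes on version B (the rewrite author's own statement) =====
-- stated objective: alternative
-- what changed: Replaces the index-based bubble sort (repeated full passes with adjacent swaps) by a bucket scheme: B filters the matching opinions once, collects the distinct lengths, sorts them descending, and emits each length's bucket in encounter order, which preserves bubble sort's stable descending-by-length order.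
import Mathlib
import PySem

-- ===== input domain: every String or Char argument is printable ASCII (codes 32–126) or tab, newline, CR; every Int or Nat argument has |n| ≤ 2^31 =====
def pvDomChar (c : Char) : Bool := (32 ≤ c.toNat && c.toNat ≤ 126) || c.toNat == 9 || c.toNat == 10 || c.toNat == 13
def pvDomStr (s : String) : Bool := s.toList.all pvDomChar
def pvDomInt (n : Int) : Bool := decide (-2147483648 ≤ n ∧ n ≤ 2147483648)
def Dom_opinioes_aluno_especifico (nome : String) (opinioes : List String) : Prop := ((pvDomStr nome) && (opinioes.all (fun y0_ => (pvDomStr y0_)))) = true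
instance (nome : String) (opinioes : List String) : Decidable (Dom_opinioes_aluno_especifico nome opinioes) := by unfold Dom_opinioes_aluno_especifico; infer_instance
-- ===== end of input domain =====

-- B replaces A's bubble sort with a bucket-by-length scheme (filter once, emit distinct lengths
-- in descending order); equal return value, different algorithm. A does not mutate its argument.

-- ===== PORT A =====
-- one step of the inner while body: compare vetor[j], vetor[j+1] and swap if needed
-- (Python re-reads len(vetor) each iteration; the length is invariant under the swap, so the
--  frozen ranges below are exact)
def pvSwapStep (w : List String) (j : Int) : List String :=
  if PySem.Str.len (PySem.List.pyGetD w j "") < PySem.Str.len (PySem.List.pyGetD w (j + 1) "") then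
    PySem.List.pySetD (PySem.List.pySetD w j (PySem.List.pyGetD w (j + 1) "")) (j + 1)
      (PySem.List.pyGetD w j "")
  else w

-- the inner 'while j < len(vetor) - 1' loop of ordenar_bubble
def pvInnerPass (w : List String) : List String :=
  (PySem.List.pyRange 0 (PySem.List.len w - 1) 1).foldl pvSwapStep w

-- ordenar_bubble: the outer 'while i < len(vetor) - 1' loop (i unused in the body)
def pvOrdenarBubble (v : List String) : List String :=
  (PySem.List.pyRange 0 (PySem.List.len v - 1) 1).foldl (fun w _ => pvInnerPass w) v

def opinioes_aluno_especifico (nome : String) (opinioes : List String) : List String :=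
  -- the selection while-loop ('if nome == opinioes[i].split(",")[0]: append'); split(",") is
  -- never empty, so the [0] index never raises (pyGetD default is unreachable)
  let opinioes_aluno := opinioes.foldl
    (fun acc op =>
      if nome == PySem.List.pyGetD ((PySem.Str.split? op ",").getD []) 0 "" then acc ++ [op]
      else acc) []
  pvOrdenarBubble opinioes_aluno

-- ===== PORT B =====
def opinioes_aluno_especifico_alt (nome : String) (opinioes : List String) : List String :=
  let sel := opinioes.filter
    (fun op => PySem.List.pyGetD ((PySem.Str.split? op ",").getD []) 0 "" == nome)
  let lens := PySem.List.sorted (PySem.Set.ofList (sel.map PySem.Str.len)) (fun k => k) true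
  lens.flatMap (fun k => sel.filter (fun op => PySem.Str.len op == k))

-- ===== PRECONDITION & SPEC =====
def Spec_opinioes_aluno_especifico (nome : String) (opinioes : List String) (out : List String) : Prop := out = opinioes_aluno_especifico_alt nome opinioes
instance (nome : String) (opinioes : List String) (out : List String) : Decidable (Spec_opinioes_aluno_especifico nome opinioes out) := by unfold Spec_opinioes_aluno_especifico; infer_instance

-- ===== CLAIM (what is proved, stated in full; the proofs are below) =====
def Claim_equal_opinioes_aluno_especifico : Prop := ∀ (nome : String) (opinioes : List String), Dom_opinioes_aluno_especifico nome opinioes → Spec_opinioes_aluno_especifico nome opinioes (opinioes_aluno_especifico nome opinioes)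

-- ===== LEMMAS AND PROOFS =====

-- descending-by-length order
def pvR (a b : String) : Prop := PySem.Str.len b ≤ PySem.Str.len a

-- structural form of one bubble pass: carry the current smaller element rightwards
def pvGo (c : String) : List String → List String
  | [] => [c]
  | y :: t => if PySem.Str.len c < PySem.Str.len y then y :: pvGo c t else c :: pvGo y t

def pvPass : List String → List String
  | [] => []
  | x :: t => pvGo x t

lemma pvGo_nil (c : String) : pvGo c [] = [c] := rfl

lemma pvGo_cons (c y : String) (t : List String) :
    pvGo c (y :: t) =
      if PySem.Str.len c < PySem.Str.len y then y :: pvGo c t else c :: pvGo y t := rfl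

lemma pvBeqComm (a b : String) : (a == b) = (b == a) := by
  rw [Bool.eq_iff_iff]
  simp only [beq_iff_eq]
  exact eq_comm

lemma pvSel_eq (nome : String) (ops : List String) :
    ops.foldl (fun acc op =>
        if nome == PySem.List.pyGetD ((PySem.Str.split? op ",").getD []) 0 "" then acc ++ [op]
        else acc) []
      = ops.filter
          (fun op => PySem.List.pyGetD ((PySem.Str.split? op ",").getD []) 0 "" == nome) := by
  rw [PySem.List.foldl_append_if_eq_filter]
  simp only [List.nil_append]
  exact List.filter_congr (fun op _ => pvBeqComm nome _)

lemma pvSwapStep_cons (p : String) (r : List String) (k : Nat) :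
    pvSwapStep (p :: r) (1 + (k : Int)) = p :: pvSwapStep r (k : Int) := by
  have h1 : (1 + (k : Int)) = ((k + 1 : Nat) : Int) := by push_cast; ring
  have h2 : (1 + (k : Int) + 1) = ((k + 2 : Nat) : Int) := by push_cast; ring
  have h3 : (((k + 1 : Nat) : Int) + 1) = ((k + 2 : Nat) : Int) := by push_cast; ring
  have h4 : ((k : Int) + 1) = ((k + 1 : Nat) : Int) := by push_cast; ring
  simp only [pvSwapStep, h1, h2, h3, h4, PySem.List.pyGetD_natCast, PySem.List.pySetD_natCast,
    List.getD_cons_succ, List.set_cons_succ]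
  split <;> rfl

lemma pvFoldl_shift (l : List Nat) : ∀ (p : String) (r : List String),
    l.foldl (fun acc (k : Nat) => pvSwapStep acc (1 + (k : Int))) (p :: r)
      = p :: l.foldl (fun acc (k : Nat) => pvSwapStep acc (k : Int)) r := by
  induction l with
  | nil => intro p r; rfl
  | cons k l ih => intro p r; simp only [List.foldl_cons, pvSwapStep_cons, ih]

lemma pvStep_zero (a b : String) (t : List String) :
    pvSwapStep (a :: b :: t) 0 =
      if PySem.Str.len a < PySem.Str.len b then b :: a :: t else a :: b :: t := by
  have e0 : (0 : Int) = ((0 : Nat) : Int) := rfl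
  have e1 : (0 : Int) + 1 = ((1 : Nat) : Int) := by norm_num
  rw [pvSwapStep, e1, e0]
  simp only [PySem.List.pyGetD_natCast, PySem.List.pySetD_natCast]
  rw [show (a :: b :: t).getD 0 "" = a from by rfl, show (a :: b :: t).getD 1 "" = b from by rfl]
  split <;> rfl

lemma pvRange_cast (n : Nat) (a : Int) :
    PySem.List.pyRange a (a + (n : Int)) 1
      = (List.range n).map (fun (k : Nat) => a + (k : Int)) := by
  induction n with
  | zero => simp [PySem.List.pyRange_one_eq_nil]
  | succ n ih =>
    have h1 : a + ((n + 1 : Nat) : Int) = (a + (n : Int)) + 1 := by push_cast; ring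
    rw [h1, PySem.List.pyRange_one_succ_right (by omega), ih, List.range_succ, List.map_append]
    simp

lemma pvInnerPass_cons_cons (a b : String) (t : List String) :
    pvInnerPass (a :: b :: t) =
      (if PySem.Str.len a < PySem.Str.len b then b else a)
        :: pvInnerPass ((if PySem.Str.len a < PySem.Str.len b then a else b) :: t) := by
  have hlen : PySem.List.len (a :: b :: t) - 1 = ((t.length + 1 : Nat) : Int) := by
    simp only [PySem.List.len_eq, List.length_cons]
    push_cast
    ring
  have hlen2 : PySem.List.len
      ((if PySem.Str.len a < PySem.Str.len b then a else b) :: t) - 1 = ((t.length : Nat) : Int) := by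
    split <;> (simp only [PySem.List.len_eq, List.length_cons]; push_cast; ring)
  have hpos : (0 : Int) < ((t.length + 1 : Nat) : Int) := by positivity
  rw [pvInnerPass, pvInnerPass, hlen, hlen2, PySem.List.pyRange_one_cons hpos, List.foldl_cons,
    pvStep_zero]
  have hr1 : PySem.List.pyRange (0 + 1) ((t.length + 1 : Nat) : Int) 1
      = (List.range t.length).map (fun (k : Nat) => 1 + (k : Int)) := by
    rw [show ((0 : Int) + 1) = 1 from by norm_num,
      show (((t.length + 1 : Nat) : Int)) = 1 + (t.length : Int) from by push_cast; ring]
    exact pvRange_cast t.length 1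
  have hr0 : PySem.List.pyRange 0 ((t.length : Nat) : Int) 1
      = (List.range t.length).map (fun (k : Nat) => 0 + (k : Int)) := by
    rw [show ((t.length : Nat) : Int) = 0 + (t.length : Int) from by ring]
    exact pvRange_cast t.length 0
  rw [hr1, hr0, List.foldl_map, List.foldl_map]
  simp only [zero_add]
  split
  · exact pvFoldl_shift (List.range t.length) b (a :: t)
  · exact pvFoldl_shift (List.range t.length) a (b :: t)

lemma pvInnerPass_eq_pass : ∀ (v : List String), pvInnerPass v = pvPass v := by
  have aux : ∀ (t : List String) (a b : String), pvInnerPass (a :: b :: t) = pvGo a (b :: t) := by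
    intro t
    induction t with
    | nil =>
      intro a b
      rw [pvInnerPass_cons_cons]
      have ha : pvInnerPass [a] = [a] := rfl
      have hb : pvInnerPass [b] = [b] := rfl
      by_cases h : PySem.Str.len a < PySem.Str.len b
      · rw [if_pos h, if_pos h, ha, pvGo_cons, if_pos h, pvGo_nil]
      · rw [if_neg h, if_neg h, hb, pvGo_cons, if_neg h, pvGo_nil]
    | cons y t ih =>
      intro a b
      rw [pvInnerPass_cons_cons]
      by_cases h : PySem.Str.len a < PySem.Str.len b
      · rw [if_pos h, if_pos h, ih a y, pvGo_cons a b (y :: t), if_pos h]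
      · rw [if_neg h, if_neg h, ih b y, pvGo_cons a b (y :: t), if_neg h]
  intro v
  match v with
  | [] => rfl
  | [x] => rfl
  | a :: b :: t => exact aux t a b

lemma pvFoldl_const {α β : Type} (g : α → α) (l : List β) : ∀ (v : α),
    l.foldl (fun w _ => g w) v = g^[l.length] v := by
  induction l with
  | nil => intro v; rfl
  | cons x l ih => intro v; simp only [List.foldl_cons, List.length_cons, ih,
      Function.iterate_succ_apply]

lemma pvBubble_eq (v : List String) : pvOrdenarBubble v = pvPass^[v.length - 1] v := by
  rw [pvOrdenarBubble]
  have hfun : pvInnerPass = pvPass := funext pvInnerPass_eq_pass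
  rw [show (fun (w : List String) (_ : Int) => pvInnerPass w)
      = (fun (w : List String) (_ : Int) => pvPass w) from by rw [hfun]]
  rw [pvFoldl_const]
  congr 1
  simp only [PySem.List.length_pyRange_one, PySem.List.len_eq]
  omega

lemma pvGo_length : ∀ (t : List String) (c : String), (pvGo c t).length = t.length + 1 := by
  intro t
  induction t with
  | nil => intro c; rfl
  | cons y t ih => intro c; rw [pvGo_cons]; split <;> simp [ih]

lemma pvPass_length (v : List String) : (pvPass v).length = v.length := by
  cases v <;> simp [pvPass, pvGo_length]

lemma pvGo_filter : ∀ (t : List String) (c : String) (k : Int),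
    (pvGo c t).filter (fun x => PySem.Str.len x == k)
      = (c :: t).filter (fun x => PySem.Str.len x == k) := by
  intro t
  induction t with
  | nil => intro c k; rfl
  | cons y t ih =>
    intro c k
    by_cases h : PySem.Str.len c < PySem.Str.len y
    · rw [pvGo_cons, if_pos h, List.filter_cons, ih c k]
      have hne : PySem.Str.len c ≠ PySem.Str.len y := ne_of_lt h
      by_cases hck : PySem.Str.len c = k
      · have hyk : PySem.Str.len y ≠ k := by omega
        simp at hck hyk
        simp [List.filter_cons, hck, hyk]
      · by_cases hyk : PySem.Str.len y = k
        · simp at hck hyk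
          simp [List.filter_cons, hck, hyk]
        · simp at hck hyk
          simp [List.filter_cons, hck, hyk]
    · rw [pvGo_cons, if_neg h, List.filter_cons, ih y k]
      simp only [List.filter_cons]

lemma pvPass_filter (v : List String) (k : Int) :
    (pvPass v).filter (fun x => PySem.Str.len x == k)
      = v.filter (fun x => PySem.Str.len x == k) := by
  cases v with
  | nil => rfl
  | cons x t => exact pvGo_filter t x k

lemma pvGo_spec : ∀ (t : List String) (c : String), ∃ w m, pvGo c t = w ++ [m] ∧ m ∈ c :: t ∧
    (∀ a ∈ c :: t, PySem.Str.len m ≤ PySem.Str.len a) ∧ (∀ a ∈ w, a ∈ c :: t) := by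
  intro t
  induction t with
  | nil => intro c; exact ⟨[], c, rfl, by simp, by simp, by simp⟩
  | cons y t ih =>
    intro c
    by_cases h : PySem.Str.len c < PySem.Str.len y
    · obtain ⟨w, m, he, hm, hmin, hw⟩ := ih c
      refine ⟨y :: w, m, by rw [pvGo_cons, if_pos h, he]; rfl, ?_, ?_, ?_⟩
      · rcases List.mem_cons.mp hm with h1 | h1 <;> simp [h1]
      · intro a ha
        rcases List.mem_cons.mp ha with rfl | ha
        · exact hmin a (by simp)
        rcases List.mem_cons.mp ha with rfl | ha
        · exact le_trans (hmin c (by simp)) (le_of_lt h)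
        · exact hmin a (by simp [ha])
      · intro a ha
        rcases List.mem_cons.mp ha with rfl | ha
        · simp
        · have := hw a ha
          rcases List.mem_cons.mp this with h1 | h1 <;> simp [h1]
    · obtain ⟨w, m, he, hm, hmin, hw⟩ := ih y
      refine ⟨c :: w, m, by rw [pvGo_cons, if_neg h, he]; rfl, ?_, ?_, ?_⟩
      · rcases List.mem_cons.mp hm with h1 | h1 <;> simp [h1]
      · intro a ha
        rcases List.mem_cons.mp ha with rfl | ha
        · exact le_trans (hmin y (by simp)) (not_lt.mp h)
        rcases List.mem_cons.mp ha with rfl | ha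
        · exact hmin a (by simp)
        · exact hmin a (by simp [ha])
      · intro a ha
        rcases List.mem_cons.mp ha with rfl | ha
        · simp
        · have := hw a ha
          rcases List.mem_cons.mp this with h1 | h1 <;> simp [h1]

lemma pvGo_of_le : ∀ (v : List String) (c : String),
    (∀ b ∈ v, PySem.Str.len b ≤ PySem.Str.len c) → v.Pairwise pvR → pvGo c v = c :: v := by
  intro v
  induction v with
  | nil => intro c _ _; rfl
  | cons y v ih =>
    intro c hle hp
    have hcy : ¬ PySem.Str.len c < PySem.Str.len y := not_lt.mpr (hle y (by simp))
    rw [pvGo_cons, if_neg hcy]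
    have hp' := List.pairwise_cons.mp hp
    rw [ih y hp'.1 hp'.2]

lemma pvPass_of_pairwise (v : List String) (hp : v.Pairwise pvR) : pvPass v = v := by
  cases v with
  | nil => rfl
  | cons x t =>
    have hp' := List.pairwise_cons.mp hp
    exact pvGo_of_le t x hp'.1 hp'.2

lemma pvGo_append : ∀ (t : List String) (c : String) (v : List String),
    (∀ b ∈ v, ∀ a ∈ c :: t, PySem.Str.len b ≤ PySem.Str.len a) → v.Pairwise pvR →
    pvGo c (t ++ v) = pvGo c t ++ v := by
  intro t
  induction t with
  | nil =>
    intro c v hb hp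
    simp only [List.nil_append]
    rw [pvGo_of_le v c (fun b hbv => hb b hbv c (by simp)) hp]
    rfl
  | cons y t ih =>
    intro c v hb hp
    rw [List.cons_append]
    by_cases h : PySem.Str.len c < PySem.Str.len y
    · rw [pvGo_cons, if_pos h, pvGo_cons, if_pos h,
        ih c v (fun b hbv a ha => hb b hbv a (by
          rcases List.mem_cons.mp ha with rfl | ha <;> simp [ha])) hp]
      rfl
    · rw [pvGo_cons, if_neg h, pvGo_cons, if_neg h,
        ih y v (fun b hbv a ha => hb b hbv a (by
          rcases List.mem_cons.mp ha with rfl | ha <;> simp [ha])) hp]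
      rfl

lemma pvIter_inv : ∀ (k : Nat) (v : List String),
    (pvPass^[k] v).Pairwise pvR ∨
    ∃ u s, pvPass^[k] v = u ++ s ∧ u ≠ [] ∧ s.Pairwise pvR ∧
      (∀ a ∈ u, ∀ b ∈ s, PySem.Str.len b ≤ PySem.Str.len a) ∧ k ≤ s.length := by
  intro k
  induction k with
  | zero =>
    intro v
    cases v with
    | nil => left; simp
    | cons x t =>
      right
      exact ⟨x :: t, [], by simp, by simp, by simp, by simp, by simp⟩
  | succ k ih =>
    intro v
    rw [Function.iterate_succ_apply']
    rcases ih v with hp | ⟨u, s, he, hu, hs, hbd, hlen⟩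
    · left; rw [pvPass_of_pairwise _ hp]; exact hp
    · rw [he]
      obtain ⟨c, t, rfl⟩ := List.exists_cons_of_ne_nil hu
      have hgo : pvPass ((c :: t) ++ s) = pvGo c t ++ s := by
        rw [List.cons_append]
        show pvGo c (t ++ s) = _
        exact pvGo_append t c s (fun b hbs a ha => hbd a ha b hbs) hs
      obtain ⟨w, m, hwm, hm, hmin, hw⟩ := pvGo_spec t c
      rw [hgo, hwm]
      have hms : (m :: s).Pairwise pvR :=
        List.pairwise_cons.mpr ⟨fun b hb => hbd m hm b hb, hs⟩
      cases w with
      | nil => left; simpa using hms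
      | cons w0 w' =>
        right
        refine ⟨w0 :: w', m :: s, by simp, by simp, hms, ?_, by simp; omega⟩
        intro a ha b hb
        rcases List.mem_cons.mp hb with rfl | hb
        · exact hmin a (hw a ha)
        · exact hbd a (hw a ha) b hb

lemma pvIter_length : ∀ (k : Nat) (v : List String), (pvPass^[k] v).length = v.length := by
  intro k
  induction k with
  | zero => intro v; rfl
  | succ k ih => intro v; rw [Function.iterate_succ_apply', pvPass_length, ih]

lemma pvSorted_final (v : List String) : (pvPass^[v.length - 1] v).Pairwise pvR := by
  rcases pvIter_inv (v.length - 1) v with hp | ⟨u, s, he, hu, hs, hbd, hlen⟩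
  · exact hp
  · have hL := pvIter_length (v.length - 1) v
    rw [he, List.length_append] at hL
    have hu1 : 0 < u.length := List.length_pos_of_ne_nil hu
    have : u.length = 1 := by omega
    obtain ⟨a, rfl⟩ := List.length_eq_one_iff.mp this
    rw [he]
    refine List.pairwise_append.mpr ⟨by simp, hs, ?_⟩
    intro a' ha' b hb
    have : a' = a := by simpa using ha'
    subst this
    exact hbd a' (by simp) b hb

lemma pvIter_filter : ∀ (i : Nat) (v : List String) (k : Int),
    (pvPass^[i] v).filter (fun x => PySem.Str.len x == k)
      = v.filter (fun x => PySem.Str.len x == k) := by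
  intro i
  induction i with
  | zero => intro v k; rfl
  | succ i ih => intro v k; rw [Function.iterate_succ_apply', pvPass_filter, ih]

lemma pvUnique : ∀ (t₁ t₂ : List String), t₁.Pairwise pvR → t₂.Pairwise pvR →
    (∀ k : Int, t₁.filter (fun x => PySem.Str.len x == k)
      = t₂.filter (fun x => PySem.Str.len x == k)) → t₁ = t₂ := by
  intro t₁
  induction t₁ with
  | nil =>
    intro t₂ _ _ hf
    cases t₂ with
    | nil => rfl
    | cons y s =>
      exfalso
      have := hf (PySem.Str.len y)
      simp [List.filter_cons] at this
  | cons x r ih =>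
    intro t₂ hp1 hp2 hf
    cases t₂ with
    | nil =>
      exfalso
      have := hf (PySem.Str.len x)
      simp [List.filter_cons] at this
    | cons y s =>
      have h1 : ∀ b ∈ r, PySem.Str.len b ≤ PySem.Str.len x := (List.pairwise_cons.mp hp1).1
      have h2 : ∀ b ∈ s, PySem.Str.len b ≤ PySem.Str.len y := (List.pairwise_cons.mp hp2).1
      have hxy : PySem.Str.len x = PySem.Str.len y := by
        by_contra hne
        rcases lt_or_gt_of_ne hne with hlt | hgt
        · have hfx := hf (PySem.Str.len y)
          have hnil : (x :: r).filter (fun z => PySem.Str.len z == PySem.Str.len y) = [] := by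
            apply List.filter_eq_nil_iff.mpr
            intro z hz
            simp only [beq_iff_eq, decide_eq_true_eq]
            rcases List.mem_cons.mp hz with rfl | hz
            · omega
            · have := h1 z hz; omega
          rw [hnil] at hfx
          simp [List.filter_cons] at hfx
        · have hfx := hf (PySem.Str.len x)
          have hnil : (y :: s).filter (fun z => PySem.Str.len z == PySem.Str.len x) = [] := by
            apply List.filter_eq_nil_iff.mpr
            intro z hz
            simp only [beq_iff_eq, decide_eq_true_eq]
            rcases List.mem_cons.mp hz with rfl | hz
            · omega
            · have := h2 z hz; omega
          rw [hnil] at hfx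
          simp [List.filter_cons] at hfx
      have hhead := hf (PySem.Str.len x)
      rw [List.filter_cons, List.filter_cons] at hhead
      simp only [← hxy, beq_self_eq_true, if_true] at hhead
      obtain ⟨hxyeq, htail⟩ := List.cons_eq_cons.mp hhead
      subst hxyeq
      have hfr : ∀ k : Int, r.filter (fun z => PySem.Str.len z == k)
          = s.filter (fun z => PySem.Str.len z == k) := by
        intro k
        by_cases hk : PySem.Str.len x = k
        · subst hk; exact htail
        · have hb : (PySem.Str.len x == k) = false := by
            simp only [beq_eq_false_iff_ne]
            exact hk
          have := hf k
          rw [List.filter_cons, List.filter_cons] at this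
          rw [hb] at this
          simpa using this
      rw [ih s (List.pairwise_cons.mp hp1).2 (List.pairwise_cons.mp hp2).2 hfr]

lemma pvPairwise_of_const {l : List String} {k : Int}
    (h : ∀ a ∈ l, PySem.Str.len a = k) : l.Pairwise pvR := by
  induction l with
  | nil => exact List.Pairwise.nil
  | cons x t ih =>
    refine List.pairwise_cons.mpr ⟨?_, ih (fun a ha => h a (by simp [ha]))⟩
    intro b hb
    have := h b (by simp [hb])
    have := h x (by simp)
    simp only [pvR]
    omega

lemma pvBucket_key {sel : List String} {j : Int} {x : String}
    (hx : x ∈ sel.filter (fun z => PySem.Str.len z == j)) : PySem.Str.len x = j := by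
  have := List.of_mem_filter hx
  simpa using this

lemma pvFlat_pairwise (K : List Int) (sel : List String) (hp : K.Pairwise (fun a b => b < a)) :
    (K.flatMap (fun j => sel.filter (fun z => PySem.Str.len z == j))).Pairwise pvR := by
  induction K with
  | nil => simp
  | cons k K ih =>
    rw [List.flatMap_cons]
    have hp' := List.pairwise_cons.mp hp
    refine List.pairwise_append.mpr ⟨pvPairwise_of_const (fun a ha => pvBucket_key ha),
      ih hp'.2, ?_⟩
    intro a ha b hb
    obtain ⟨j, hj, hbj⟩ := List.mem_flatMap.mp hb
    have hak : PySem.Str.len a = k := pvBucket_key ha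
    have hbjk : PySem.Str.len b = j := pvBucket_key hbj
    have := hp'.1 j hj
    simp only [pvR]
    omega

lemma pvFilter_flatMap {α β : Type} (K : List α) (g : α → List β) (p : β → Bool) :
    (K.flatMap g).filter p = K.flatMap (fun j => (g j).filter p) := by
  induction K with
  | nil => rfl
  | cons k K ih => rw [List.flatMap_cons, List.flatMap_cons, List.filter_append, ih]

lemma pvBucket_filter_ne (sel : List String) {j k : Int} (hjk : j ≠ k) :
    (sel.filter (fun z => PySem.Str.len z == j)).filter (fun z => PySem.Str.len z == k) = [] := by
  apply List.filter_eq_nil_iff.mpr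
  intro z hz
  have := pvBucket_key hz
  simp only [beq_iff_eq]
  omega

lemma pvBucket_filter_self (sel : List String) (k : Int) :
    (sel.filter (fun z => PySem.Str.len z == k)).filter (fun z => PySem.Str.len z == k)
      = sel.filter (fun z => PySem.Str.len z == k) := by
  apply List.filter_eq_self.mpr
  intro z hz
  have := pvBucket_key hz
  simpa using this

lemma pvFlat_filter (K : List Int) (sel : List String) (hnd : K.Nodup)
    (hmem : ∀ j : Int, j ∈ K ↔ j ∈ sel.map PySem.Str.len) (k : Int) :
    (K.flatMap (fun j => sel.filter (fun z => PySem.Str.len z == j))).filter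
        (fun z => PySem.Str.len z == k)
      = sel.filter (fun z => PySem.Str.len z == k) := by
  rw [pvFilter_flatMap]
  by_cases hk : k ∈ K
  · obtain ⟨P, S, rfl⟩ := List.append_of_mem hk
    have hndP := List.nodup_append.mp hnd
    have hkP : k ∉ P := by
      intro hc
      exact hndP.2.2 k hc k (by simp) rfl
    have hkS : k ∉ S := by
      have := hndP.2.1
      exact (List.nodup_cons.mp this).1
    rw [List.flatMap_append, List.flatMap_cons]
    have hP : P.flatMap (fun j =>
        (sel.filter (fun z => PySem.Str.len z == j)).filter (fun z => PySem.Str.len z == k)) = [] := by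
      apply List.flatMap_eq_nil_iff.mpr
      intro j hj
      exact pvBucket_filter_ne sel (fun hc => hkP (hc ▸ hj))
    have hS : S.flatMap (fun j =>
        (sel.filter (fun z => PySem.Str.len z == j)).filter (fun z => PySem.Str.len z == k)) = [] := by
      apply List.flatMap_eq_nil_iff.mpr
      intro j hj
      exact pvBucket_filter_ne sel (fun hc => hkS (hc ▸ hj))
    rw [hP, hS, pvBucket_filter_self]
    simp
  · have hsel : sel.filter (fun z => PySem.Str.len z == k) = [] := by
      apply List.filter_eq_nil_iff.mpr
      intro z hz
      simp only [beq_iff_eq, decide_eq_true_eq]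
      intro hc
      exact hk ((hmem k).mpr (List.mem_map.mpr ⟨z, hz, hc⟩))
    rw [hsel]
    apply List.flatMap_eq_nil_iff.mpr
    intro j hj
    exact pvBucket_filter_ne sel (fun hc => hk (hc ▸ hj))

lemma pvMain (sel : List String) :
    pvOrdenarBubble sel =
      (PySem.List.sorted (PySem.Set.ofList (sel.map PySem.Str.len)) (fun k => k) true).flatMap
        (fun k => sel.filter (fun op => PySem.Str.len op == k)) := by
  set K := PySem.List.sorted (PySem.Set.ofList (sel.map PySem.Str.len)) (fun k => k) true with hK
  have hKperm : K.Perm (PySem.Set.ofList (sel.map PySem.Str.len)) := PySem.List.sorted_perm _ _ _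
  have hKnd : K.Nodup := by
    have hnodup : (PySem.Set.ofList (sel.map PySem.Str.len)).Nodup :=
      PySem.Set.nodup_ofList (sel.map PySem.Str.len)
    exact (List.Perm.nodup_iff hKperm).mpr hnodup
  have hKle : K.Pairwise (fun a b => b ≤ a) := by
    have := PySem.List.sorted_pairwise_rev (xs := PySem.Set.ofList (sel.map PySem.Str.len))
      (key := fun k => k)
    simpa using this
  have hKlt : K.Pairwise (fun a b => b < a) :=
    (hKle.and hKnd).imp (fun h => lt_of_le_of_ne h.1 (Ne.symm h.2))
  have hKmem : ∀ j : Int, j ∈ K ↔ j ∈ sel.map PySem.Str.len := by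
    intro j
    rw [hK, PySem.List.mem_sorted, PySem.Set.mem_ofList]
  rw [pvBubble_eq]
  apply pvUnique
  · exact pvSorted_final sel
  · exact pvFlat_pairwise K sel hKlt
  · intro k
    rw [pvIter_filter, pvFlat_filter K sel hKnd hKmem k]

-- ===== VERDICT (by name: the statement is the Claim_ definition above) =====
theorem opinioes_aluno_especifico_spec : Claim_equal_opinioes_aluno_especifico := by
  intro nome opinioes _
  unfold Spec_opinioes_aluno_especifico opinioes_aluno_especifico opinioes_aluno_especifico_alt
  rw [pvSel_eq]
  exact pvMain _
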